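-- pv_equiv track=rewrite | github.com/Lospub/-Computational-Cryptography | SSD and DPD/a10.py | findSumDiff_DPD
-- ===== SOURCE A (Python) =====
-- def findSumDiff_DPD(sample, cipherDic):
--     keyList = []
--     for key in sample.keys():
--         if key not in keyList:
--             keyList.append(key)
--     for key in cipherDic.keys():
--         if key not in keyList:
--             keyList.append(key)
--     diff_sum = 0
--     for key in keyList:
--         if (key in sample.keys()) and (key in cipherDic.keys()):
--             diff = sample[key] - cipherDic[key]
--         elif (key in sample.keys()) and (key not in cipherDic.keys()):
--             diff = sample[key]
--         else:
--             diff = cipherDic[key]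
--         square = diff ** 2
--         diff_sum += square
--     return diff_sum
-- ===== SOURCE B (Python) =====
-- def findSumDiff_DPD(sample, cipherDic):
--     total = 0
--     for key, v in sample.items():
--         total += (v - cipherDic.get(key, 0)) ** 2
--     for key, v in cipherDic.items():
--         if key not in sample:
--             total += v * v
--     return total
-- ===== Notes on version B (the rewrite author's own statement) =====
-- stated objective: faster
-- what changed: B builds no union key list and has no 3-way branch: one pass over sample.items() accumulating (v - cipherDic.get(key,0))**2 covers shared and sample-only keys, and a second pass over cipherDic.items() adds v*v for cipher-only keys.
import Mathlib
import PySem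

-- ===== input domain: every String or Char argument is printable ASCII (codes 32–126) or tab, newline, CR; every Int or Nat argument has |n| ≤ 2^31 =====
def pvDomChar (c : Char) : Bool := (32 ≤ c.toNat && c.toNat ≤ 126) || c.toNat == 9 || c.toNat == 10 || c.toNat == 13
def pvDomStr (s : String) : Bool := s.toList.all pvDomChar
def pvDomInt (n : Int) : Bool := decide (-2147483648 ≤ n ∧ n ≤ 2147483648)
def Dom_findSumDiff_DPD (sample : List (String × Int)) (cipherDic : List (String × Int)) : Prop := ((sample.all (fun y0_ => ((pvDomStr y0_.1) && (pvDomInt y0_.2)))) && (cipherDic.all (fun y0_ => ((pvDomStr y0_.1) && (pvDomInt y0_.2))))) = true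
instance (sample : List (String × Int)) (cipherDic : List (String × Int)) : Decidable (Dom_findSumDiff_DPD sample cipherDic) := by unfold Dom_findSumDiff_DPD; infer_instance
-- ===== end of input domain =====

-- B drops A's union key list and 3-way branch for two direct passes over the two dicts (return value only; no mutation involved).

-- ===== PORT A =====
-- first-match lookup in an association list: d[k] (some v) / KeyError (none); both A and B index their dicts this way
def lookupV : List (String × Int) → String → Option Int
  | [], _ => none
  | (k, v) :: rest, x => if k == x then some v else lookupV rest x

def findSumDiff_DPD (sample : List (String × Int)) (cipherDic : List (String × Int)) : Int :=
  -- keyList: 'for key in sample.keys(): if key not in keyList: keyList.append(key)', then the same over cipherDic.keys()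
  let sKeys := sample.map Prod.fst
  let cKeys := cipherDic.map Prod.fst
  let keyList : PySem.Set String := cKeys.foldl PySem.Set.add (sKeys.foldl PySem.Set.add PySem.Set.empty)
  keyList.foldl (fun diff_sum key =>
    let diff : Int :=
      if sKeys.contains key && cKeys.contains key then
        (lookupV sample key).getD 0 - (lookupV cipherDic key).getD 0
      else if sKeys.contains key && !cKeys.contains key then
        (lookupV sample key).getD 0
      else
        (lookupV cipherDic key).getD 0
    diff_sum + diff ^ 2) 0

-- ===== PORT B =====
def findSumDiff_DPD_alt (sample : List (String × Int)) (cipherDic : List (String × Int)) : Int :=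
  -- total += (v - cipherDic.get(key, 0)) ** 2  over sample.items()
  let total := sample.foldl (fun t p => t + (p.2 - (lookupV cipherDic p.1).getD 0) ^ 2) 0
  -- for key, v in cipherDic.items(): if key not in sample: total += v * v
  cipherDic.foldl (fun t p => if !(sample.map Prod.fst).contains p.1 then t + p.2 * p.2 else t) total

-- ===== PRECONDITION & SPEC =====
-- Pre_ only states that each association list represents a Python dict: keys are distinct
-- (a Python dict can never present duplicate keys, so this excludes no realizable input of A).
def Pre_findSumDiff_DPD (sample : List (String × Int)) (cipherDic : List (String × Int)) : Prop :=
  (sample.map Prod.fst).Nodup ∧ (cipherDic.map Prod.fst).Nodup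
instance (sample : List (String × Int)) (cipherDic : List (String × Int)) : Decidable (Pre_findSumDiff_DPD sample cipherDic) := by unfold Pre_findSumDiff_DPD; infer_instance

def pvWitness_findSumDiff_DPD : (List (String × Int)) × (List (String × Int)) :=
  ([("a", 3), ("b", -2)], [("b", 5), ("c", 4)])

def Spec_findSumDiff_DPD (sample : List (String × Int)) (cipherDic : List (String × Int)) (out : Int) : Prop := out = findSumDiff_DPD_alt sample cipherDic
instance (sample : List (String × Int)) (cipherDic : List (String × Int)) (out : Int) : Decidable (Spec_findSumDiff_DPD sample cipherDic out) := by unfold Spec_findSumDiff_DPD; infer_instance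

-- ===== CLAIM (what is proved, stated in full; the proofs are below) =====
def Claim_equal_findSumDiff_DPD : Prop := ∀ (sample : List (String × Int)) (cipherDic : List (String × Int)), Dom_findSumDiff_DPD sample cipherDic → Pre_findSumDiff_DPD sample cipherDic → Spec_findSumDiff_DPD sample cipherDic (findSumDiff_DPD sample cipherDic)

-- ===== LEMMAS AND PROOFS =====

theorem lookupV_eq_some (l : List (String × Int)) (k : String) (v : Int)
    (hmem : (k, v) ∈ l) (hnd : (l.map Prod.fst).Nodup) : lookupV l k = some v := by
  induction l with
  | nil => cases hmem
  | cons p rest ih =>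
    obtain ⟨k', v'⟩ := p
    simp only [List.map_cons, List.nodup_cons] at hnd
    rcases List.mem_cons.1 hmem with h | h
    · cases h; simp [lookupV]
    · have hne : k' ≠ k := by
        intro he; exact hnd.1 (he ▸ (List.mem_map.2 ⟨(k, v), h, rfl⟩))
      simp [lookupV, hne, ih h hnd.2]

theorem lookupV_eq_none (l : List (String × Int)) (k : String)
    (h : k ∉ l.map Prod.fst) : lookupV l k = none := by
  induction l with
  | nil => rfl
  | cons p rest ih =>
    simp only [List.map_cons, List.mem_cons, not_or] at h
    have : p.1 ≠ k := fun he => h.1 he.symm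
    obtain ⟨k', v'⟩ := p
    simp [lookupV, this, ih h.2]

theorem sum_map_ite (l : List (String × Int)) (c : String × Int → Bool) (h : String × Int → Int) :
    (l.map (fun p => if c p then h p else 0)).sum
      = ((l.filter (fun p => c p)).map h).sum := by
  induction l with
  | nil => rfl
  | cons p rest ih =>
    by_cases hc : c p = true <;> simp [hc, ih]

-- the second foldl of B, reshaped so foldl_add applies
theorem filter_map_fst (l : List (String × Int)) (q : String → Bool) :
    (l.map Prod.fst).filter q = (l.filter (fun p => q p.1)).map Prod.fst := by
  induction l with
  | nil => rfl
  | cons p rest ih =>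
    by_cases hq : q p.1 = true <;> simp [hq, ih]

theorem foldB (cipherDic : List (String × Int)) (c : String × Int → Bool) (t : Int) :
    cipherDic.foldl (fun t p => if c p then t + p.2 * p.2 else t) t
      = cipherDic.foldl (fun t p => t + (if c p then p.2 * p.2 else 0)) t := by
  induction cipherDic generalizing t with
  | nil => rfl
  | cons p rest ih => by_cases hc : c p = true <;> simp [hc, ih]

-- ===== VERDICT (by name: the statement is the Claim_ definition above) =====
theorem findSumDiff_DPD_spec : Claim_equal_findSumDiff_DPD := by
  intro sample cipherDic _ hpre
  obtain ⟨hs, hc⟩ := hpre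
  unfold Spec_findSumDiff_DPD findSumDiff_DPD findSumDiff_DPD_alt
  simp only []
  -- the union key list
  have hkey : (cipherDic.map Prod.fst).foldl PySem.Set.add
        ((sample.map Prod.fst).foldl PySem.Set.add PySem.Set.empty)
      = sample.map Prod.fst
        ++ (cipherDic.map Prod.fst).filter
            (fun y => !(PySem.Set.contains (sample.map Prod.fst) y)) := by
    have h1 : (sample.map Prod.fst).foldl PySem.Set.add PySem.Set.empty
        = PySem.Set.ofList (sample.map Prod.fst) :=
      (PySem.Set.ofList_eq_foldl (sample.map Prod.fst)).symm
    rw [h1, PySem.Set.ofList_eq_self_of_nodup _ hs]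
    have h2 : (cipherDic.map Prod.fst).foldl PySem.Set.add (sample.map Prod.fst)
        = PySem.Set.update (sample.map Prod.fst) (cipherDic.map Prod.fst) := rfl
    rw [h2, PySem.Set.update_eq_append_filter, PySem.Set.ofList_eq_self_of_nodup _ hc]
  rw [hkey]
  rw [List.foldl_append]
  rw [PySem.List.foldl_add, PySem.List.foldl_add, PySem.List.foldl_add, foldB,
      PySem.List.foldl_add]
  -- first halves agree pointwise
  have hfst : ((sample.map Prod.fst).map (fun key =>
        (if (sample.map Prod.fst).contains key && (cipherDic.map Prod.fst).contains key then
          (lookupV sample key).getD 0 - (lookupV cipherDic key).getD 0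
        else if (sample.map Prod.fst).contains key && !(cipherDic.map Prod.fst).contains key then
          (lookupV sample key).getD 0
        else (lookupV cipherDic key).getD 0) ^ 2))
      = sample.map (fun p => (p.2 - (lookupV cipherDic p.1).getD 0) ^ 2) := by
    rw [List.map_map]
    apply List.map_congr_left
    intro p hp
    have hsk : (sample.map Prod.fst).contains p.1 = true := by
      simp [List.mem_map]; exact ⟨p.2, (by simpa using hp)⟩
    have hlv : lookupV sample p.1 = some p.2 := lookupV_eq_some _ _ _ (by simpa using hp) hs
    cases hck : (cipherDic.map Prod.fst).contains p.1 with
    | true => simp only [Function.comp, hsk, hck, Bool.and_true, if_pos, hlv, Option.getD_some]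
    | false =>
      have hn : lookupV cipherDic p.1 = none := by
        apply lookupV_eq_none; simpa using hck
      simp only [Function.comp, hsk, hck, hlv, hn, Bool.and_false, Bool.not_false,
        Bool.and_true, Option.getD_some, Option.getD_none]
      simp
  rw [hfst]
  -- second halves agree
  have hsnd : (((cipherDic.map Prod.fst).filter
          (fun y => !(PySem.Set.contains (sample.map Prod.fst) y))).map (fun key =>
        (if (sample.map Prod.fst).contains key && (cipherDic.map Prod.fst).contains key then
          (lookupV sample key).getD 0 - (lookupV cipherDic key).getD 0
        else if (sample.map Prod.fst).contains key && !(cipherDic.map Prod.fst).contains key then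
          (lookupV sample key).getD 0
        else (lookupV cipherDic key).getD 0) ^ 2)).sum
      = (cipherDic.map (fun p =>
          if !(sample.map Prod.fst).contains p.1 then p.2 * p.2 else 0)).sum := by
    rw [sum_map_ite]
    have hfm : (cipherDic.map Prod.fst).filter
          (fun y => !(PySem.Set.contains (sample.map Prod.fst) y))
        = (cipherDic.filter (fun p => !(sample.map Prod.fst).contains p.1)).map Prod.fst := by
      have := filter_map_fst cipherDic (fun y => !((sample.map Prod.fst).contains y))
      simpa [PySem.Set.contains_eq_listContains] using this
    rw [hfm, List.map_map]
    apply congrArg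
    apply List.map_congr_left
    intro p hp
    have hpc : p ∈ cipherDic := List.mem_of_mem_filter hp
    have hpn : (sample.map Prod.fst).contains p.1 = false := by
      have := List.of_mem_filter hp
      simpa using this
    have hlv : lookupV cipherDic p.1 = some p.2 :=
      lookupV_eq_some _ _ _ (by simpa using hpc) hc
    simp only [Function.comp, hpn, hlv, Bool.false_and, Option.getD_some]
    simp [sq]
  rw [hsnd]
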